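-- pv_equiv track=rewrite | github.com/furrukh-asif/Machine-Learning-x-Knot-Theory | Knot Theory Game/kauffmanBracket.py | KauffmanState
-- ===== SOURCE A (Python) =====
-- def KauffmanState(pd,statevec):
--     resolved_pd=[]
--     for x in range(len(statevec)):
--         if statevec[x]==0:
--             resolved_pd.append([pd[x][0],pd[x][1]])
--             resolved_pd.append([pd[x][2],pd[x][3]])
--         if statevec[x]==1:
--             resolved_pd.append([pd[x][3],pd[x][0]])
--             resolved_pd.append([pd[x][1],pd[x][2]])
--     edge_list=[*range(1,2*len(statevec)+1,1)]
--     components=[]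
--     while len(edge_list)>0:
--         components.append([edge_list[0]])
--         edge_list.pop(0)
--         i=0
--         while i<len(components[-1]):
--             neighbors=[]
--             for x in range(len(resolved_pd)):
--                 if resolved_pd[x][0]==components[-1][i] and resolved_pd[x][1] in edge_list:
--                     neighbors.append(resolved_pd[x][1])
--                 if resolved_pd[x][1]==components[-1][i] and resolved_pd[x][0] in edge_list:
--                     neighbors.append(resolved_pd[x][0])
--             neighbors=list(set(neighbors))
--             for x in range(len(neighbors)):
--                 components[-1].append(neighbors[x])
--                 edge_list.remove(neighbors[x])
--             i+=1
--     return components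
-- ===== SOURCE B (Python) =====
-- def KauffmanState(pd, statevec):
--     # Adjacency dict built once; remaining edges kept in a set; same BFS order
--     # (including list(set(...)) dedup order) as the original.
--     adj = {}
--     for x in range(len(statevec)):
--         s = statevec[x]
--         if s == 0:
--             resolved = ((pd[x][0], pd[x][1]), (pd[x][2], pd[x][3]))
--         elif s == 1:
--             resolved = ((pd[x][3], pd[x][0]), (pd[x][1], pd[x][2]))
--         else:
--             continue
--         for a, b in resolved:
--             adj.setdefault(a, []).append(b)
--             adj.setdefault(b, []).append(a)
--     n2 = 2 * len(statevec)
--     remaining = set(range(1, n2 + 1))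
--     components = []
--     for start in range(1, n2 + 1):
--         if start not in remaining:
--             continue
--         remaining.discard(start)
--         comp = [start]
--         i = 0
--         while i < len(comp):
--             neighbors = list({b for b in adj.get(comp[i], []) if b in remaining})
--             for b in neighbors:
--                 comp.append(b)
--                 remaining.discard(b)
--             i += 1
--         components.append(comp)
--     return components
-- ===== Notes on version B (the rewrite author's own statement) =====
-- stated objective: faster
-- what changed: B builds an adjacency dict of the resolved-crossing pairs once and keeps the unvisited edges in a set, so each BFS step looks up its neighbours directly instead of rescanning the whole resolved-pair list and doing linear list membership tests and removals as A does; the list(set(...)) dedup order of each neighbour layer is preserved exactly.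
import Mathlib
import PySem

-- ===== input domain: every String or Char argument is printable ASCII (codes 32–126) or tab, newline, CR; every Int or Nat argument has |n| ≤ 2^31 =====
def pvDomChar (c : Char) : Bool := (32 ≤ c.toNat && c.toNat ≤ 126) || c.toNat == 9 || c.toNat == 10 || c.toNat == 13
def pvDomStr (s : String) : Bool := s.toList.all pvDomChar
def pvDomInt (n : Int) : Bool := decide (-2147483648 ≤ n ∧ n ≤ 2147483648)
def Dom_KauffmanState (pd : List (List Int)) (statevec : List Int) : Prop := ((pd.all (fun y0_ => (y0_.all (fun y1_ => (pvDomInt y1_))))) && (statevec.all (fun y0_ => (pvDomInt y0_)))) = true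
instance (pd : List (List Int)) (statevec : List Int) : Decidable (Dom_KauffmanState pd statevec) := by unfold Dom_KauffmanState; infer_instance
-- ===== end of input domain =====

-- B replaces A's per-element rescans of the resolved-pair list (and its list-based
-- membership/removal) by an adjacency dict built once and a set of remaining edges;
-- return values agree exactly (both Pythons use list(set(...)), modelled below).

-- ===== shared helper: model of CPython 3.11's list(set(xs)) =====
-- Both Pythons call list(set(neighbors)). Its order is CPython's hash-table order;
-- pvSetList transcribes CPython's set insertion/probing/resize (hash(x) = x), exact for
-- the nonnegative int elements that occur here (elements come from edge_list ⊆ {1..2n}).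
def pvLin (t : Array (Option Nat)) (h : Nat) : Nat → Nat → Option (Option (Array (Option Nat)))
  | _, 0 => none
  | j, k+1 =>
    match t.getD j none with
    | none => some (some (t.setIfInBounds j (some h)))
    | some v => if v = h then some none else pvLin t h (j+1) k

def pvProbeAdd (h mask : Nat) : Nat → Array (Option Nat) → Nat → Nat → Option (Array (Option Nat))
  | 0, t, _, _ => some t
  | fuel+1, t, perturb, i =>
    match t.getD i none with
    | none => some (t.setIfInBounds i (some h))
    | some v =>
      if v = h then none
      else
        match (if i + 9 ≤ mask then pvLin t h (i+1) 9 else none) with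
        | some (some t') => some t'
        | some none => none
        | none =>
          let perturb' := perturb >>> 5
          pvProbeAdd h mask fuel t perturb' ((i*5+1+perturb') &&& mask)

def pvLinClean (t : Array (Option Nat)) (h : Nat) : Nat → Nat → Option (Array (Option Nat))
  | _, 0 => none
  | j, k+1 =>
    match t.getD j none with
    | none => some (t.setIfInBounds j (some h))
    | some _ => pvLinClean t h (j+1) k

def pvCleanAdd (h mask : Nat) : Nat → Array (Option Nat) → Nat → Nat → Array (Option Nat)
  | 0, t, _, _ => t
  | fuel+1, t, perturb, i =>
    match t.getD i none with
    | none => t.setIfInBounds i (some h)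
    | some _ =>
      match (if i + 9 ≤ mask then pvLinClean t h (i+1) 9 else none) with
      | some t' => t'
      | none =>
        let perturb' := perturb >>> 5
        pvCleanAdd h mask fuel t perturb' ((i*5+1+perturb') &&& mask)

def pvGrow (minused : Nat) : Nat → Nat → Nat
  | 0, ns => ns
  | f+1, ns => if ns ≤ minused then pvGrow minused f (ns*2) else ns

def pvSetAddH (s : Array (Option Nat) × Nat × Nat) (h : Nat) : Array (Option Nat) × Nat × Nat :=
  let t := s.1; let fill := s.2.1; let used := s.2.2
  let mask := t.size - 1
  match pvProbeAdd h mask (t.size + 20) t h (h &&& mask) with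
  | none => s
  | some t' =>
    let fill := fill + 1
    let used := used + 1
    if fill*5 ≥ mask*3 then
      let minused := if used > 50000 then used*2 else used*4
      let ns := pvGrow minused 64 8
      let t2 := t'.foldl (fun acc slot =>
        match slot with
        | none => acc
        | some v => pvCleanAdd v (ns-1) (ns+20) acc v (v &&& (ns-1))) (Array.replicate ns none)
      (t2, fill, used)
    else (t', fill, used)

def pvSetList (xs : List Int) : List Int :=
  let s := xs.foldl (fun st x => pvSetAddH st x.toNat) (Array.replicate 8 none, 0, 0)
  (s.1.toList.filterMap id).map (fun n => (n : Int))

-- ===== PORT A =====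
-- resolved crossings are kept as pairs (the Python's 2-element lists)
def pvNbrsA (resolved : List (Int × Int)) (e : Int) (el : List Int) : List Int :=
  resolved.foldl (fun acc p =>
    (acc ++ (if p.1 = e ∧ el.contains p.2 then [p.2] else []))
        ++ (if p.2 = e ∧ el.contains p.1 then [p.1] else [])) []

-- inner 'while i < len(components[-1])' loop; fuel = len(edge_list) + 1 bounds its
-- iteration count (each iteration past the first removes its elements from edge_list)
def pvInnerA (resolved : List (Int × Int)) : Nat → List Int → Nat → List Int → (List Int × List Int)
  | 0, comp, _, el => (comp, el)
  | fuel+1, comp, i, el =>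
    if i < comp.length then
      let e := PySem.List.pyGetD comp (i : Int) 0
      let ns := pvSetList (pvNbrsA resolved e el)
      let s := ns.foldl (fun (cl : List Int × List Int) b =>
                 (cl.1 ++ [b], (PySem.List.remove? cl.2 b).getD cl.2)) (comp, el)
      -- edge_list.remove never raises here: ns ⊆ el and ns has no duplicates
      pvInnerA resolved fuel s.1 (i+1) s.2
    else (comp, el)

-- outer 'while len(edge_list)>0' loop; edge_list strictly shrinks, fuel = its length
def pvOuterA (resolved : List (Int × Int)) : Nat → List Int → List (List Int) → List (List Int)
  | _, [], comps => comps
  | 0, _ :: _, comps => comps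
  | fuel+1, e :: rest, comps =>
    let s := pvInnerA resolved (rest.length + 1) [e] 0 rest
    pvOuterA resolved fuel s.2 (comps ++ [s.1])

def pvStepA (pd : List (List Int)) (statevec : List Int) (acc : List (Int × Int)) (x : Nat) : List (Int × Int) :=
  let acc := if PySem.List.pyGetD statevec (x : Int) 0 = 0 then
      acc ++ [(PySem.List.pyGetD (PySem.List.pyGetD pd (x : Int) []) 0 0,
               PySem.List.pyGetD (PySem.List.pyGetD pd (x : Int) []) 1 0),
              (PySem.List.pyGetD (PySem.List.pyGetD pd (x : Int) []) 2 0,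
               PySem.List.pyGetD (PySem.List.pyGetD pd (x : Int) []) 3 0)] else acc
  if PySem.List.pyGetD statevec (x : Int) 0 = 1 then
      acc ++ [(PySem.List.pyGetD (PySem.List.pyGetD pd (x : Int) []) 3 0,
               PySem.List.pyGetD (PySem.List.pyGetD pd (x : Int) []) 0 0),
              (PySem.List.pyGetD (PySem.List.pyGetD pd (x : Int) []) 1 0,
               PySem.List.pyGetD (PySem.List.pyGetD pd (x : Int) []) 2 0)] else acc

def KauffmanState (pd : List (List Int)) (statevec : List Int) : List (List Int) :=
  let resolved := (List.range statevec.length).foldl (pvStepA pd statevec) []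
  let edge_list := PySem.List.pyRange 1 (2*(statevec.length:Int)+1) 1
  pvOuterA resolved edge_list.length edge_list []

-- ===== PORT B =====
-- adj.setdefault(a, []).append(b); adj.setdefault(b, []).append(a)
def pvAddEdge (d : PySem.Dict Int (List Int)) (p : Int × Int) : PySem.Dict Int (List Int) :=
  (d.modify p.1 [] (· ++ [p.2])).modify p.2 [] (· ++ [p.1])

def pvInnerB (adj : PySem.Dict Int (List Int)) : Nat → List Int → Nat → PySem.Set Int → (List Int × PySem.Set Int)
  | 0, comp, _, rem => (comp, rem)
  | fuel+1, comp, i, rem =>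
    if i < comp.length then
      let e := PySem.List.pyGetD comp (i : Int) 0
      let ns := pvSetList ((PySem.Dict.getD adj e []).filter (fun b => PySem.Set.contains rem b))
      let s := ns.foldl (fun (cl : List Int × PySem.Set Int) b =>
                 (cl.1 ++ [b], PySem.Set.discard cl.2 b)) (comp, rem)
      pvInnerB adj fuel s.1 (i+1) s.2
    else (comp, rem)

def pvStepB (pd : List (List Int)) (statevec : List Int) (d : PySem.Dict Int (List Int)) (x : Nat) : PySem.Dict Int (List Int) :=
  if PySem.List.pyGetD statevec (x : Int) 0 = 0 then
    pvAddEdge (pvAddEdge d (PySem.List.pyGetD (PySem.List.pyGetD pd (x : Int) []) 0 0,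
                            PySem.List.pyGetD (PySem.List.pyGetD pd (x : Int) []) 1 0))
              (PySem.List.pyGetD (PySem.List.pyGetD pd (x : Int) []) 2 0,
               PySem.List.pyGetD (PySem.List.pyGetD pd (x : Int) []) 3 0)
  else if PySem.List.pyGetD statevec (x : Int) 0 = 1 then
    pvAddEdge (pvAddEdge d (PySem.List.pyGetD (PySem.List.pyGetD pd (x : Int) []) 3 0,
                            PySem.List.pyGetD (PySem.List.pyGetD pd (x : Int) []) 0 0))
              (PySem.List.pyGetD (PySem.List.pyGetD pd (x : Int) []) 1 0,
               PySem.List.pyGetD (PySem.List.pyGetD pd (x : Int) []) 2 0)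
  else d

def KauffmanState_alt (pd : List (List Int)) (statevec : List Int) : List (List Int) :=
  let adj := (List.range statevec.length).foldl (pvStepB pd statevec) PySem.Dict.empty
  let starts := PySem.List.pyRange 1 (2*(statevec.length:Int)+1) 1
  let s := starts.foldl (fun (st : PySem.Set Int × List (List Int)) start =>
    if PySem.Set.contains st.1 start then
      let rem1 := PySem.Set.discard st.1 start
      let r := pvInnerB adj (rem1.length + 1) [start] 0 rem1
      (r.2, st.2 ++ [r.1])
    else st) (PySem.Set.ofList starts, [])
  s.2

-- ===== PRECONDITION & SPEC =====
-- exactly the inputs on which A returns: whenever statevec[x] is 0 or 1, A reads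
-- pd[x][0..3] (IndexError otherwise); everything else in A is total
def Pre_KauffmanState (pd : List (List Int)) (statevec : List Int) : Prop :=
  ∀ x, x < statevec.length → (statevec.getD x 0 = 0 ∨ statevec.getD x 0 = 1) →
    x < pd.length ∧ 4 ≤ (pd.getD x []).length
instance (pd : List (List Int)) (statevec : List Int) : Decidable (Pre_KauffmanState pd statevec) := by
  unfold Pre_KauffmanState; infer_instance

def pvWitness_KauffmanState : List (List Int) × List Int := ([[1, 2, 3, 4], [3, 4, 1, 2]], [0, 1])

def Spec_KauffmanState (pd : List (List Int)) (statevec : List Int) (out : List (List Int)) : Prop := out = KauffmanState_alt pd statevec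
instance (pd : List (List Int)) (statevec : List Int) (out : List (List Int)) : Decidable (Spec_KauffmanState pd statevec out) := by unfold Spec_KauffmanState; infer_instance

-- ===== CLAIM (what is proved, stated in full; the proofs are below) =====
def Claim_equal_KauffmanState : Prop := ∀ (pd : List (List Int)) (statevec : List Int), Dom_KauffmanState pd statevec → Pre_KauffmanState pd statevec → Spec_KauffmanState pd statevec (KauffmanState pd statevec)

-- ===== LEMMAS AND PROOFS =====

-- Python's list.remove on a duplicate-free list is Python's set.discard
theorem pv_remove_eq_discard (l : List Int) (b : Int) (hn : l.Nodup) :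
    (PySem.List.remove? l b).getD l = PySem.Set.discard l b := by
  unfold PySem.List.remove? PySem.Set.discard
  induction l with
  | nil => simp [List.idxOf?]
  | cons x l ih =>
    rw [List.nodup_cons] at hn
    rw [List.idxOf?_cons]
    by_cases hx : x = b
    · subst hx
      simp only [beq_self_eq_true, if_true, Option.map_some, Option.getD_some,
        List.eraseIdx_cons_zero, List.filter_cons, bne_self_eq_false, Bool.not_true,
        Bool.false_eq_true, if_false]
      rw [List.filter_eq_self.mpr]
      intro a ha
      simp only [Bool.not_eq_true', beq_eq_false_iff_ne, ne_eq]
      rintro rfl; exact hn.1 ha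
    · have hbx : (x == b) = false := by simp [hx]
      rw [hbx]
      simp only [Bool.false_eq_true, if_false, List.filter_cons, hbx, Bool.not_false, if_true]
      cases hidx : List.idxOf? b l with
      | none =>
        have := ih hn.2
        rw [hidx] at this
        simp only [Option.map_none, Option.getD_none] at this
        rw [← this]
        simp
      | some k =>
        have := ih hn.2
        rw [hidx] at this
        simp only [Option.map_some, Option.getD_some] at this ⊢
        simp only [List.eraseIdx_cons_succ, this]

-- the per-layer append/remove fold: A's list version equals B's set version …
theorem pv_fold_eq (ns comp el : List Int) (hn : el.Nodup) :
    ns.foldl (fun (cl : List Int × List Int) b =>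
        (cl.1 ++ [b], (PySem.List.remove? cl.2 b).getD cl.2)) (comp, el)
      = ns.foldl (fun (cl : List Int × PySem.Set Int) b =>
        (cl.1 ++ [b], PySem.Set.discard cl.2 b)) (comp, el) := by
  induction ns generalizing comp el with
  | nil => rfl
  | cons b ns ih =>
    simp only [List.foldl_cons]
    rw [pv_remove_eq_discard el b hn]
    exact ih (comp ++ [b]) (PySem.Set.discard el b)
      ((List.filter_sublist).nodup hn)

-- … and its remaining-edge state only shrinks
theorem pv_foldB_sublist (ns comp el : List Int) :
    ((ns.foldl (fun (cl : List Int × PySem.Set Int) b =>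
        (cl.1 ++ [b], PySem.Set.discard cl.2 b)) (comp, el)).2).Sublist el := by
  induction ns generalizing comp el with
  | nil => exact List.Sublist.refl el
  | cons b ns ih =>
    simp only [List.foldl_cons]
    exact (ih (comp ++ [b]) (PySem.Set.discard el b)).trans (List.filter_sublist)

theorem pv_inner_eq (resolved : List (Int × Int)) (adj : PySem.Dict Int (List Int))
    (H : ∀ e el', pvNbrsA resolved e el'
        = (PySem.Dict.getD adj e []).filter (fun b => PySem.Set.contains el' b)) :
    ∀ (fuel : Nat) (comp : List Int) (i : Nat) (el : List Int), el.Nodup →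
      pvInnerA resolved fuel comp i el = pvInnerB adj fuel comp i el := by
  intro fuel
  induction fuel with
  | zero => intro comp i el _; rfl
  | succ fuel ih =>
    intro comp i el hn
    unfold pvInnerA pvInnerB
    by_cases hi : i < comp.length
    · simp only [hi, if_true]
      rw [H, pv_fold_eq _ _ _ hn]
      exact ih _ _ _ ((pv_foldB_sublist _ _ _).nodup hn)
    · simp only [hi, if_false]

theorem pv_innerB_sublist (adj : PySem.Dict Int (List Int)) :
    ∀ (fuel : Nat) (comp : List Int) (i : Nat) (el : List Int),
      ((pvInnerB adj fuel comp i el).2 : List Int).Sublist el := by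
  intro fuel
  induction fuel with
  | zero => intro comp i el; exact List.Sublist.refl el
  | succ fuel ih =>
    intro comp i el
    unfold pvInnerB
    by_cases hi : i < comp.length
    · simp only [hi, if_true]
      exact (ih _ _ _).trans (pv_foldB_sublist _ _ _)
    · simp only [hi, if_false]
      exact List.Sublist.refl el

-- the outer loops agree: B's for-loop over range(1, 2n+1) with a remaining-set equals
-- A's while-loop popping the head of the (always sorted-subsequence) edge_list
theorem pv_outer_eq (resolved : List (Int × Int)) (adj : PySem.Dict Int (List Int))
    (H : ∀ e el', pvNbrsA resolved e el'
        = (PySem.Dict.getD adj e []).filter (fun b => PySem.Set.contains el' b)) :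
    ∀ (starts el : List Int) (comps : List (List Int)) (fuel : Nat),
      starts.Nodup → el.Sublist starts → el.length ≤ fuel →
      (starts.foldl (fun (st : PySem.Set Int × List (List Int)) start =>
        if PySem.Set.contains st.1 start then
          let rem1 := PySem.Set.discard st.1 start
          let r := pvInnerB adj (rem1.length + 1) [start] 0 rem1
          (r.2, st.2 ++ [r.1])
        else st) (el, comps)).2 = pvOuterA resolved fuel el comps := by
  intro starts
  induction starts with
  | nil =>
    intro el comps fuel _ hsub _
    rw [List.sublist_nil.mp hsub]
    cases fuel <;> rfl
  | cons s rest ih =>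
    intro el comps fuel hnd hsub hfuel
    rw [List.nodup_cons] at hnd
    simp only [List.foldl_cons]
    by_cases hs : s ∈ el
    · obtain ⟨el', rfl, hsub'⟩ : ∃ el', el = s :: el' ∧ el'.Sublist rest := by
        cases hsub with
        | cons _ h => exact absurd (h.subset hs) hnd.1
        | cons₂ _ h => exact ⟨_, rfl, h⟩
      have hcont : PySem.Set.contains (s :: el' : PySem.Set Int) s = true := by
        simp [PySem.Set.contains]
      rw [if_pos hcont]
      have hsnot : s ∉ el' := fun h => hnd.1 (hsub'.subset h)
      have hdis : PySem.Set.discard (s :: el' : PySem.Set Int) s = el' := by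
        simp only [PySem.Set.discard, List.filter_cons]
        have h1 : (!s == s) = false := by simp
        rw [h1]
        simp only [Bool.false_eq_true, if_false]
        rw [List.filter_eq_self.mpr]
        intro a ha
        simp only [Bool.not_eq_true', beq_eq_false_iff_ne, ne_eq]
        rintro rfl; exact hsnot ha
      rw [hdis]
      have hnodup' : el'.Nodup := hsub'.nodup hnd.2
      obtain ⟨fuel', rfl⟩ : ∃ f, fuel = f + 1 := by
        cases fuel with
        | zero => simp at hfuel
        | succ f => exact ⟨f, rfl⟩
      rw [← pv_inner_eq resolved adj H _ _ _ _ hnodup']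
      show _ = pvOuterA resolved (fuel'+1) (s :: el') comps
      unfold pvOuterA
      have hsubl2 := (pv_innerB_sublist adj (el'.length+1) [s] 0 el')
      rw [pv_inner_eq resolved adj H _ _ _ _ hnodup'] at *
      exact ih _ _ _ hnd.2 (hsubl2.trans hsub')
        (le_trans (List.Sublist.length_le hsubl2)
          (by simp only [List.length_cons] at hfuel; omega))
    · rw [if_neg (by simp [PySem.Set.contains, hs])]
      have hsub' : el.Sublist rest := by
        cases hsub with
        | cons _ h => exact h
        | cons₂ _ h => exact absurd (List.mem_cons_self) hs
      exact ih _ _ _ hnd.2 hsub' hfuel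

-- adjacency characterisation chain
def pvPairsOf (pd : List (List Int)) (statevec : List Int) (x : Nat) : List (Int × Int) :=
  (if PySem.List.pyGetD statevec (x : Int) 0 = 0 then
      [(PySem.List.pyGetD (PySem.List.pyGetD pd (x : Int) []) 0 0,
        PySem.List.pyGetD (PySem.List.pyGetD pd (x : Int) []) 1 0),
       (PySem.List.pyGetD (PySem.List.pyGetD pd (x : Int) []) 2 0,
        PySem.List.pyGetD (PySem.List.pyGetD pd (x : Int) []) 3 0)] else [])
  ++ (if PySem.List.pyGetD statevec (x : Int) 0 = 1 then
      [(PySem.List.pyGetD (PySem.List.pyGetD pd (x : Int) []) 3 0,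
        PySem.List.pyGetD (PySem.List.pyGetD pd (x : Int) []) 0 0),
       (PySem.List.pyGetD (PySem.List.pyGetD pd (x : Int) []) 1 0,
        PySem.List.pyGetD (PySem.List.pyGetD pd (x : Int) []) 2 0)] else [])

theorem pv_stepA_eq (pd : List (List Int)) (statevec : List Int) (acc : List (Int × Int)) (x : Nat) :
    pvStepA pd statevec acc x = acc ++ pvPairsOf pd statevec x := by
  unfold pvStepA pvPairsOf
  generalize PySem.List.pyGetD statevec (x : Int) 0 = sx
  by_cases h0 : sx = 0
  · have h1 : ¬ sx = 1 := by rw [h0]; decide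
    simp [h0, h1]
  · by_cases h1 : sx = 1
    · simp [h0, h1]
    · simp [h0, h1]

theorem pv_resolved_eq (pd : List (List Int)) (statevec : List Int) (l : List Nat) (acc : List (Int × Int)) :
    l.foldl (pvStepA pd statevec) acc = acc ++ l.flatMap (pvPairsOf pd statevec) := by
  induction l generalizing acc with
  | nil => simp
  | cons x l ih =>
    simp only [List.foldl_cons, List.flatMap_cons, pv_stepA_eq, ih, List.append_assoc]

theorem pv_stepB_eq (pd : List (List Int)) (statevec : List Int) (d : PySem.Dict Int (List Int)) (x : Nat) :
    pvStepB pd statevec d x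
      = ((pvPairsOf pd statevec x).flatMap (fun p => [(p.1, p.2), (p.2, p.1)])).foldl
          (fun d p => d.modify p.1 [] (fun v => v ++ [p.2])) d := by
  unfold pvStepB pvPairsOf
  generalize PySem.List.pyGetD statevec (x : Int) 0 = sx
  by_cases h0 : sx = 0
  · have h1 : ¬ sx = 1 := by rw [h0]; decide
    simp [h0, h1, pvAddEdge]
  · by_cases h1 : sx = 1
    · simp [h0, h1, pvAddEdge]
    · simp [h0, h1]

theorem pv_adj_eq (pd : List (List Int)) (statevec : List Int) (l : List Nat) (d : PySem.Dict Int (List Int)) :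
    l.foldl (pvStepB pd statevec) d
      = (((l.flatMap (pvPairsOf pd statevec)).flatMap (fun p => [(p.1, p.2), (p.2, p.1)])).foldl
          (fun d p => d.modify p.1 [] (fun v => v ++ [p.2])) d) := by
  induction l generalizing d with
  | nil => rfl
  | cons x l ih =>
    simp only [List.foldl_cons, List.flatMap_cons, List.flatMap_append, List.foldl_append,
      pv_stepB_eq, ih]

theorem pv_nbrs_char (resolved : List (Int × Int)) (e : Int) (el : List Int) :
    pvNbrsA resolved e el
      = (((resolved.flatMap (fun p => [(p.1, p.2), (p.2, p.1)])).filter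
          (fun p => p.1 == e)).map (fun p => p.2)).filter (fun b => PySem.Set.contains el b) := by
  unfold pvNbrsA
  suffices h : ∀ acc : List Int, resolved.foldl (fun acc p =>
      (acc ++ (if p.1 = e ∧ el.contains p.2 then [p.2] else []))
        ++ (if p.2 = e ∧ el.contains p.1 then [p.1] else [])) acc
    = acc ++ (((resolved.flatMap (fun p => [(p.1, p.2), (p.2, p.1)])).filter
          (fun p => p.1 == e)).map (fun p => p.2)).filter (fun b => PySem.Set.contains el b) by
    simpa using h []
  induction resolved with
  | nil => simp
  | cons p l ih =>
    intro acc
    simp only [List.foldl_cons, List.flatMap_cons, List.filter_append, List.map_append, ih,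
      List.append_assoc]
    simp only [List.filter_cons, List.filter_nil, List.append_nil]
    by_cases ha : p.1 = e <;> by_cases hb : p.2 = e <;>
      by_cases hca : p.1 ∈ el <;> by_cases hcb : p.2 ∈ el <;>
        simp_all [PySem.Set.contains]

-- ===== VERDICT (by name: the statement is the Claim_ definition above) =====
theorem KauffmanState_spec : Claim_equal_KauffmanState := by
  intro pd statevec _ _
  unfold Spec_KauffmanState KauffmanState KauffmanState_alt
  have hres := pv_resolved_eq pd statevec (List.range statevec.length) []
  rw [List.nil_append] at hres
  have hadj := pv_adj_eq pd statevec (List.range statevec.length) PySem.Dict.empty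
  have H : ∀ e el', pvNbrsA ((List.range statevec.length).foldl (pvStepA pd statevec) []) e el'
      = (PySem.Dict.getD ((List.range statevec.length).foldl (pvStepB pd statevec) PySem.Dict.empty) e []).filter
          (fun b => PySem.Set.contains el' b) := by
    intro e el'
    rw [hres, hadj, PySem.Dict.getD_foldl_modify_append, pv_nbrs_char]
    simp
  have hnd : (PySem.List.pyRange 1 (2*(statevec.length:Int)+1) 1).Nodup :=
    PySem.List.nodup_pyRange_one _ _
  dsimp only
  rw [PySem.Set.ofList_eq_self_of_nodup _ hnd]
  exact (pv_outer_eq _ _ H _ _ [] _ hnd (List.Sublist.refl _) le_rfl).symm
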